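-- pv_equiv track=rewrite | github.com/BOFHT/ratesystem | backend/ml_models/feature_extractor.py | _categorize_technologies
-- ===== SOURCE A (Python) =====
-- from typing import Dict, Any, List, Optional
--
-- def _categorize_technologies(tech_stack: List[str]) -> Dict[str, List[str]]:
--     """按类别分组技术"""
--     categories = {}
--
--     # 简单的类别映射（实际应用中应该更详细）
--     category_map = {
--         "language": ["python", "javascript", "java", "c++", "c#", "go", "rust", "ruby", "php", "swift"],
--         "framework": ["django", "flask", "fastapi", "express", "react", "vue", "angular", "spring", "laravel"],
--         "database": ["postgresql", "mysql", "mongodb", "redis", "elasticsearch", "cassandra"],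
--         "cloud": ["aws", "azure", "google_cloud", "aliyun", "heroku"],
--         "tool": ["docker", "kubernetes", "git", "jenkins", "terraform"]
--     }
--
--     for tech in tech_stack:
--         if not isinstance(tech, str):
--             continue
--
--         tech_lower = tech.lower()
--         assigned = False
--
--         for category, techs in category_map.items():
--             if tech_lower in techs:
--                 if category not in categories:
--                     categories[category] = []
--                 categories[category].append(tech)
--                 assigned = True
--                 break
--
--         if not assigned:
--             if "other" not in categories:
--                 categories["other"] = []
--             categories["other"].append(tech)
--
--     return categories
-- ===== SOURCE B (Python) =====
-- from typing import Dict, List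
--
-- _CATEGORY_MAP = {
--     "language": ["python", "javascript", "java", "c++", "c#", "go", "rust", "ruby", "php", "swift"],
--     "framework": ["django", "flask", "fastapi", "express", "react", "vue", "angular", "spring", "laravel"],
--     "database": ["postgresql", "mysql", "mongodb", "redis", "elasticsearch", "cassandra"],
--     "cloud": ["aws", "azure", "google_cloud", "aliyun", "heroku"],
--     "tool": ["docker", "kubernetes", "git", "jenkins", "terraform"]
-- }
--
-- # Reverse index built once: member tech (lowercase) -> category name.
-- _TECH_TO_CAT = {t: cat for cat, members in _CATEGORY_MAP.items() for t in members}
--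
-- def _categorize_technologies(tech_stack: List[str]) -> Dict[str, List[str]]:
--     # Stage 1: label every tech with its category (one dict lookup each).
--     labeled = [(_TECH_TO_CAT.get(t.lower(), "other"), t)
--                for t in tech_stack if isinstance(t, str)]
--     # Stage 2: first-occurrence order of the categories.
--     order = []
--     for c, _t in labeled:
--         if c not in order:
--             order.append(c)
--     # Stage 3: group by category.
--     return {c: [t for cc, t in labeled if cc == c] for c in order}
-- ===== Notes on version B (the rewrite author's own statement) =====
-- stated objective: faster
-- what changed: Replaces A's single incremental-dict loop with an inner first-match scan over the five category lists by a staged pipeline: a reverse index tech->category built once, a labelling pass mapping each tech to (category, tech), a first-occurrence pass for key order, and a group-by comprehension building each category's list from the labels.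
import Mathlib
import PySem

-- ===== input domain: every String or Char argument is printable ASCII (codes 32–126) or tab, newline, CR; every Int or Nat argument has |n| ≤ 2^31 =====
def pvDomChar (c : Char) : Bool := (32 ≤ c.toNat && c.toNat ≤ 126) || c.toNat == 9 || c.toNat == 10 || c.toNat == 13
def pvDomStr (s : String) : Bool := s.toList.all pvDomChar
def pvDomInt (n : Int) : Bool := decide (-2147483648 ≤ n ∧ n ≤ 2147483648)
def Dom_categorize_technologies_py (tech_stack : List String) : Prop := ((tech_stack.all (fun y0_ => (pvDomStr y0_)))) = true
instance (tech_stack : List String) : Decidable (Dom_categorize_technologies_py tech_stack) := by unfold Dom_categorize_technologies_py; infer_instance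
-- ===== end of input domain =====

-- B replaces A's incremental dict loop (with an inner first-match scan per tech) by a
-- three-stage pipeline: reverse index, labelling pass, first-occurrence key order, group-by;
-- equivalence of the returned dict (as an association list) is proved.

-- ===== PORT A =====
-- A's category_map literal, in source order.
def pvCategoryMapA : List (String × List String) :=
  [("language", ["python", "javascript", "java", "c++", "c#", "go", "rust", "ruby", "php", "swift"]),
   ("framework", ["django", "flask", "fastapi", "express", "react", "vue", "angular", "spring", "laravel"]),
   ("database", ["postgresql", "mysql", "mongodb", "redis", "elasticsearch", "cassandra"]),
   ("cloud", ["aws", "azure", "google_cloud", "aliyun", "heroku"]),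
   ("tool", ["docker", "kubernetes", "git", "jenkins", "terraform"])]

-- 'if category not in categories: categories[category] = []' then '.append(tech)'
def pvAppendA (categories : PySem.Dict String (List String)) (c : String) (tech : String) :
    PySem.Dict String (List String) :=
  (if categories.contains c then categories else categories.insert c []).modify c []
    (fun l => l ++ [tech])

-- the body of 'for tech in tech_stack' (the inner for with break is the fold with an 'assigned' flag)
def pvStepA (categories : PySem.Dict String (List String)) (tech : String) :
    PySem.Dict String (List String) :=
  let tech_lower := PySem.Str.lower tech
  let r := pvCategoryMapA.foldl
    (fun (st : PySem.Dict String (List String) × Bool) p =>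
      if st.2 then st
      else if p.2.contains tech_lower then (pvAppendA st.1 p.1 tech, true)
      else st) (categories, false)
  if r.2 then r.1 else pvAppendA r.1 "other" tech

def categorize_technologies_py (tech_stack : List String) : List (String × List String) :=
  (tech_stack.foldl pvStepA PySem.Dict.empty).items

-- ===== PORT B =====
def pvCategoryMapB : List (String × List String) :=
  [("language", ["python", "javascript", "java", "c++", "c#", "go", "rust", "ruby", "php", "swift"]),
   ("framework", ["django", "flask", "fastapi", "express", "react", "vue", "angular", "spring", "laravel"]),
   ("database", ["postgresql", "mysql", "mongodb", "redis", "elasticsearch", "cassandra"]),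
   ("cloud", ["aws", "azure", "google_cloud", "aliyun", "heroku"]),
   ("tool", ["docker", "kubernetes", "git", "jenkins", "terraform"])]

-- '_TECH_TO_CAT = {t: cat for cat, members in _CATEGORY_MAP.items() for t in members}'
def pvRevIndex : PySem.Dict String String :=
  PySem.Dict.ofList (pvCategoryMapB.flatMap (fun p => p.2.map (fun t => (t, p.1))))

-- '_TECH_TO_CAT.get(t.lower(), "other")'
def pvCatOf (t : String) : String := pvRevIndex.getD (PySem.Str.lower t) "other"

-- stage 1: 'labeled = [(cat, t) for t in tech_stack]'
def pvLabeled (tech_stack : List String) : List (String × String) :=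
  tech_stack.map (fun t => (pvCatOf t, t))

-- stage 2: 'order = []; for c, _t in labeled: if c not in order: order.append(c)'
def pvOrderOf (labeled : List (String × String)) : List String :=
  labeled.foldl (fun o p => if o.contains p.1 then o else o ++ [p.1]) []

-- stage 3: '{c: [t for cc, t in labeled if cc == c] for c in order}'
def categorize_technologies_py_alt (tech_stack : List String) : List (String × List String) :=
  let labeled := pvLabeled tech_stack
  (pvOrderOf labeled).map
    (fun c => (c, (labeled.filter (fun p => p.1 == c)).map (fun p => p.2)))

-- ===== PRECONDITION & SPEC =====
def Spec_categorize_technologies_py (tech_stack : List String) (out : List (String × List String)) : Prop := out = categorize_technologies_py_alt tech_stack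
instance (tech_stack : List String) (out : List (String × List String)) : Decidable (Spec_categorize_technologies_py tech_stack out) := by unfold Spec_categorize_technologies_py; infer_instance

-- ===== CLAIM (what is proved, stated in full; the proofs are below) =====
def Claim_equal_categorize_technologies_py : Prop := ∀ (tech_stack : List String), Dom_categorize_technologies_py tech_stack → Spec_categorize_technologies_py tech_stack (categorize_technologies_py tech_stack)

-- ===== LEMMAS AND PROOFS =====

-- A's create-then-append equals a single setdefault-free modify.
theorem pvAppendA_eq_modify (d : PySem.Dict String (List String)) (c tech : String) :
    pvAppendA d c tech = d.modify c [] (fun l => l ++ [tech]) := by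
  unfold pvAppendA
  by_cases h : d.contains c = true
  · simp [h]
  · simp only [h, Bool.false_eq_true, if_false, PySem.Dict.modify]
    rw [PySem.Dict.getD_of_not_contains d [] (by simpa using h),
        PySem.Dict.getD_insert_self, PySem.Dict.insert_insert_self]

-- A's first-match scan over the five lists assigns exactly B's reverse-index category.
set_option maxRecDepth 20000 in
theorem pvStepA_eq (d : PySem.Dict String (List String)) (tech : String) :
    pvStepA d tech = d.modify (pvCatOf tech) [] (fun l => l ++ [tech]) := by
  simp only [pvStepA, pvCategoryMapA, List.foldl_cons, List.foldl_nil]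
  by_cases h1 : (["python", "javascript", "java", "c++", "c#", "go", "rust", "ruby", "php", "swift"] : List String).contains (PySem.Str.lower tech)
  · simp only [h1, if_true, if_false, Bool.false_eq_true, pvAppendA_eq_modify]
    simp only [List.contains_eq_mem, decide_eq_true_eq, List.mem_cons, List.not_mem_nil, or_false] at h1
    have hc : pvCatOf tech = "language" := by
      unfold pvCatOf
      rcases h1 with h|h|h|h|h|h|h|h|h|h <;> rw [h] <;> rfl
    rw [hc]
  by_cases h2 : (["django", "flask", "fastapi", "express", "react", "vue", "angular", "spring", "laravel"] : List String).contains (PySem.Str.lower tech)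
  · simp only [h1, h2, if_true, if_false, Bool.false_eq_true, pvAppendA_eq_modify]
    simp only [List.contains_eq_mem, decide_eq_true_eq, List.mem_cons, List.not_mem_nil, or_false] at h2
    have hc : pvCatOf tech = "framework" := by
      unfold pvCatOf
      rcases h2 with h|h|h|h|h|h|h|h|h <;> rw [h] <;> rfl
    rw [hc]
  by_cases h3 : (["postgresql", "mysql", "mongodb", "redis", "elasticsearch", "cassandra"] : List String).contains (PySem.Str.lower tech)
  · simp only [h1, h2, h3, if_true, if_false, Bool.false_eq_true, pvAppendA_eq_modify]
    simp only [List.contains_eq_mem, decide_eq_true_eq, List.mem_cons, List.not_mem_nil, or_false] at h3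
    have hc : pvCatOf tech = "database" := by
      unfold pvCatOf
      rcases h3 with h|h|h|h|h|h <;> rw [h] <;> rfl
    rw [hc]
  by_cases h4 : (["aws", "azure", "google_cloud", "aliyun", "heroku"] : List String).contains (PySem.Str.lower tech)
  · simp only [h1, h2, h3, h4, if_true, if_false, Bool.false_eq_true, pvAppendA_eq_modify]
    simp only [List.contains_eq_mem, decide_eq_true_eq, List.mem_cons, List.not_mem_nil, or_false] at h4
    have hc : pvCatOf tech = "cloud" := by
      unfold pvCatOf
      rcases h4 with h|h|h|h|h <;> rw [h] <;> rfl
    rw [hc]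
  by_cases h5 : (["docker", "kubernetes", "git", "jenkins", "terraform"] : List String).contains (PySem.Str.lower tech)
  · simp only [h1, h2, h3, h4, h5, if_true, if_false, Bool.false_eq_true, pvAppendA_eq_modify]
    simp only [List.contains_eq_mem, decide_eq_true_eq, List.mem_cons, List.not_mem_nil, or_false] at h5
    have hc : pvCatOf tech = "tool" := by
      unfold pvCatOf
      rcases h5 with h|h|h|h|h <;> rw [h] <;> rfl
    rw [hc]
  · simp only [h1, h2, h3, h4, h5, if_false, Bool.false_eq_true, pvAppendA_eq_modify]
    simp only [List.contains_eq_mem, decide_eq_true_eq, List.mem_cons, List.not_mem_nil, or_false] at h1 h2 h3 h4 h5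
    push Not at h1 h2 h3 h4 h5
    obtain ⟨a1,a2,a3,a4,a5,a6,a7,a8,a9,a10⟩ := h1
    obtain ⟨b1,b2,b3,b4,b5,b6,b7,b8,b9⟩ := h2
    obtain ⟨c1,c2,c3,c4,c5,c6⟩ := h3
    obtain ⟨e1,e2,e3,e4,e5⟩ := h4
    obtain ⟨f1,f2,f3,f4,f5⟩ := h5
    have hne : ∀ p ∈ pvRevIndex.items, (p.1 == PySem.Str.lower tech) = false := by
      intro p hp
      fin_cases hp <;>
      · simp only [beq_eq_false_iff_ne, ne_eq]
        intro he
        exact absurd he.symm (by assumption)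
    have hcf : pvRevIndex.contains (PySem.Str.lower tech) = false := by
      simp only [PySem.Dict.contains]
      exact List.any_eq_false.mpr (fun p hp => by simp [hne p hp])
    have hc : pvCatOf tech = "other" := by
      unfold pvCatOf
      exact PySem.Dict.getD_of_not_contains pvRevIndex "other" hcf
    rw [hc]

-- B's first-occurrence loop is exactly set(first components) in insertion order.
theorem pvOrderOf_eq (ps : List (String × String)) :
    pvOrderOf ps = PySem.Set.ofList (ps.map (fun p => p.1)) := by
  rw [PySem.Set.ofList_eq_foldl, List.foldl_map]
  rfl

-- ===== VERDICT (by name: the statement is the Claim_ definition above) =====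

set_option maxRecDepth 40000 in
theorem categorize_technologies_py_spec : Claim_equal_categorize_technologies_py := by
  intro ts _
  show _ = _
  unfold categorize_technologies_py categorize_technologies_py_alt
  have hstep : ts.foldl pvStepA PySem.Dict.empty
      = (pvLabeled ts).foldl (fun d p => d.modify p.1 [] (fun l => l ++ [p.2])) PySem.Dict.empty := by
    unfold pvLabeled
    rw [List.foldl_map]
    exact PySem.List.foldl_congr_mem ts _ _ _ (fun d t _ => pvStepA_eq d t)
  rw [hstep]
  set L := pvLabeled ts with hL
  have hnd : ((L.foldl (fun d p => d.modify p.1 [] (fun l => l ++ [p.2])) PySem.Dict.empty)).keys.Nodup := by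
    exact PySem.Dict.nodup_keys_foldl_modify_key L (fun p => p.1)
      [] (fun _ p => (fun l => l ++ [p.2])) PySem.Dict.empty (by simp [pysem])
  rw [PySem.Dict.items_eq_map_keys _ hnd []]
  have hkeys : ((L.foldl (fun d p => d.modify p.1 [] (fun l => l ++ [p.2])) PySem.Dict.empty)).keys
      = pvOrderOf L := by
    rw [PySem.Dict.keys_foldl_modify_key L (fun p => p.1) [] (fun _ p => (fun l => l ++ [p.2])),
        PySem.Dict.keys_empty, PySem.Set.update_nil_left, pvOrderOf_eq]
  rw [hkeys]
  refine List.map_congr_left (fun c _ => ?_)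
  rw [PySem.Dict.getD_foldl_modify_append L PySem.Dict.empty c]
  simp [pysem]
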